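-- pv_equiv track=rewrite | github.com/NikitaTrushinQA/Python | stepik_pro 7.1.21.py | swapcase_vowels
-- ===== SOURCE A (Python) =====
-- def swapcase_vowels(string):
--     vowels = 'aeiouy'
--     swapped_string = ''
--
--     for char in string:
--         if char in vowels:
--             swapped_string += char.upper()
--         else:
--             swapped_string +=char
--     return swapped_string
-- ===== SOURCE B (Python) =====
-- _TABLE = str.maketrans('aeiouy', 'AEIOUY')
--
--
-- def swapcase_vowels(string):
--     return string.translate(_TABLE)
-- ===== Notes on version B (the rewrite author's own statement) =====
-- stated objective: idiomatic
-- what changed: Replaces the explicit per-character loop with membership test and string concatenation by a translation table built once with str.maketrans and applied in a single string.translate call.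
import Mathlib
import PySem

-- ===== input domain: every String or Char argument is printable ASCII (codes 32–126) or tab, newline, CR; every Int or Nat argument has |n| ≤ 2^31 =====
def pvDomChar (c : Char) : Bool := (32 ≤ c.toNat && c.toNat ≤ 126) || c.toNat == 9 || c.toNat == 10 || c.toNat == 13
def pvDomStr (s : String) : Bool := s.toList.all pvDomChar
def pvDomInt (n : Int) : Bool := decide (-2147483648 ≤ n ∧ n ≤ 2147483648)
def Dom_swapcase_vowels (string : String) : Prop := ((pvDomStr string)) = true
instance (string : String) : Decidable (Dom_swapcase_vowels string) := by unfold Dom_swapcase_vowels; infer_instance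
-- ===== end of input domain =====

-- B replaces A's per-character loop/branch/concatenation with a translation table built
-- once and applied by a single map (Python: str.maketrans + str.translate); idiomatic.

-- ===== PORT A =====
-- for char in string: if char in vowels: swapped += char.upper() else: swapped += char
def swapcase_vowels (string : String) : String :=
  let vowels := "aeiouy"
  let swapped := string.toList.foldl
    (fun acc c => if vowels.toList.contains c then acc ++ PySem.Chars.upper [c] else acc ++ [c]) []
  String.ofList swapped

-- ===== PORT B =====
-- _TABLE = str.maketrans('aeiouy', 'AEIOUY'): a dict from the zipped strings
def pvTable : PySem.Dict Char Char :=
  ("aeiouy".toList.zip "AEIOUY".toList).foldl (fun d p => d.insert p.1 p.2) PySem.Dict.empty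

-- string.translate(_TABLE): each char mapped through the table, unmapped chars kept
def swapcase_vowels_alt (string : String) : String :=
  String.ofList (string.toList.map (fun c => pvTable.getD c c))

-- ===== PRECONDITION & SPEC =====
def Spec_swapcase_vowels (string : String) (out : String) : Prop := out = swapcase_vowels_alt string
instance (string : String) (out : String) : Decidable (Spec_swapcase_vowels string out) := by unfold Spec_swapcase_vowels; infer_instance

-- ===== CLAIM (what is proved, stated in full; the proofs are below) =====
def Claim_equal_swapcase_vowels : Prop := ∀ (string : String), Dom_swapcase_vowels string → Spec_swapcase_vowels string (swapcase_vowels string)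

-- ===== LEMMAS AND PROOFS =====

-- per character, A's branch equals one table lookup
set_option maxRecDepth 16384 in
lemma pv_char (c : Char) :
    (if "aeiouy".toList.contains c then PySem.Chars.upper [c] else [c]) = [pvTable.getD c c] := by
  by_cases ha : c = 'a'; · subst ha; decide
  by_cases he : c = 'e'; · subst he; decide
  by_cases hi : c = 'i'; · subst hi; decide
  by_cases ho : c = 'o'; · subst ho; decide
  by_cases hu : c = 'u'; · subst hu; decide
  by_cases hy : c = 'y'; · subst hy; decide
  have hl : "aeiouy".toList = ['a','e','i','o','u','y'] := by decide
  have hc : "aeiouy".toList.contains c = false := by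
    rw [hl]
    simp only [List.contains_eq_mem, decide_eq_false_iff_not, List.mem_cons, List.not_mem_nil,
      or_false]
    push Not
    exact ⟨ha, he, hi, ho, hu, hy⟩
  have hk : pvTable.keys = ['a','e','i','o','u','y'] := by decide
  have hg : pvTable.getD c c = c := by
    apply PySem.Dict.getD_of_not_contains
    rw [PySem.Dict.contains_eq_decide_mem_keys, hk]
    simp only [decide_eq_false_iff_not, List.mem_cons, List.not_mem_nil, or_false]
    push Not
    exact ⟨ha, he, hi, ho, hu, hy⟩
  rw [hc]
  simp [hg]

-- A's accumulation loop builds exactly B's mapped list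
lemma pv_loop (l acc : List Char) :
    l.foldl (fun acc c => if "aeiouy".toList.contains c then acc ++ PySem.Chars.upper [c]
      else acc ++ [c]) acc = acc ++ l.map (fun c => pvTable.getD c c) := by
  induction l generalizing acc with
  | nil => simp
  | cons c l ih =>
    simp only [List.foldl_cons, List.map_cons]
    have h2 : (if "aeiouy".toList.contains c then acc ++ PySem.Chars.upper [c] else acc ++ [c])
        = acc ++ (if "aeiouy".toList.contains c then PySem.Chars.upper [c] else [c]) := by
      split_ifs <;> rfl
    rw [h2, pv_char c, ih]
    simp

-- ===== VERDICT (by name: the statement is the Claim_ definition above) =====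
theorem swapcase_vowels_spec : Claim_equal_swapcase_vowels := by
  intro s _
  show swapcase_vowels s = swapcase_vowels_alt s
  simp only [swapcase_vowels, swapcase_vowels_alt]
  rw [pv_loop]
  simp
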